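-- pv_equiv track=rewrite | github.com/xahinvest-DNA/DNA-Film-Content-Engine | runtime/project_slice.py | normalize_output_suitability
-- ===== SOURCE A (Python) =====
-- ALLOWED_OUTPUT_SUITABILITY = ("candidate", "strong", "weak", "not_suitable")
--
-- def normalize_output_suitability(output_suitability: dict | None) -> dict:
--     base = {
--         "long_video": "candidate",
--         "shorts_reels": "candidate",
--         "carousel": "candidate",
--         "packaging": "candidate",
--     }
--     if not output_suitability:
--         return base
--     normalized = dict(base)
--     for key, value in output_suitability.items():
--         if key in normalized and value in ALLOWED_OUTPUT_SUITABILITY: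
--             normalized[key] = value
--     return normalized
-- ===== SOURCE B (Python) =====
-- ALLOWED_OUTPUT_SUITABILITY = ("candidate", "strong", "weak", "not_suitable")
--
-- BASE_KEYS = ("long_video", "shorts_reels", "carousel", "packaging")
--
--
-- def normalize_output_suitability(output_suitability: dict | None) -> dict:
--     src = output_suitability or {}
--     return {
--         k: (src[k] if src.get(k) in ALLOWED_OUTPUT_SUITABILITY else "candidate")
--         for k in BASE_KEYS
--     }
-- ===== Notes on version B (the rewrite author's own statement) =====
-- stated objective: simpler
-- what changed: B inverts the traversal: instead of copying the default dict and scanning every input item with a key-membership test, it builds the result directly as a comprehension over the four fixed base keys, looking each key up in the input once.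
import Mathlib
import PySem

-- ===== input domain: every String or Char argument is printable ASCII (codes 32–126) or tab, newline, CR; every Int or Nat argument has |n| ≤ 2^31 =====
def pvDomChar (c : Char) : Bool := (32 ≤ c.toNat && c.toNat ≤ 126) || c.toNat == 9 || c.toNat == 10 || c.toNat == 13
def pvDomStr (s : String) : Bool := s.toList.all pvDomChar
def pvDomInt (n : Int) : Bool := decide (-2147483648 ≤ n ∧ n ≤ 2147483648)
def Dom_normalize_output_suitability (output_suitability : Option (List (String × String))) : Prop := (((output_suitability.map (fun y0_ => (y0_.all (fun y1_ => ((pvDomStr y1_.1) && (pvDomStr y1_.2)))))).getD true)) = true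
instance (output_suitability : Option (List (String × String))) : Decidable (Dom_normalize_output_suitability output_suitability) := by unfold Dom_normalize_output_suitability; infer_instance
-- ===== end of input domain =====

-- B inverts A's traversal: instead of copying the default dict and scanning the input's
-- items, it builds the result from the four fixed keys, looking each up in the input
-- (objective: simpler decomposition; same asymptotic cost).

-- ===== PORT A =====
-- ALLOWED_OUTPUT_SUITABILITY (module constant)
def pvAllowedA : List String := ["candidate", "strong", "weak", "not_suitable"]

-- the literal `base` dict A builds
def pvBaseA : PySem.Dict String String :=
  PySem.Dict.ofList [("long_video", "candidate"), ("shorts_reels", "candidate"),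
                     ("carousel", "candidate"), ("packaging", "candidate")]

def normalize_output_suitability (output_suitability : Option (List (String × String))) : List (String × String) :=
  match output_suitability with
  | none => pvBaseA.items                       -- `not None` is truthy → return base
  | some xs =>
    if xs.isEmpty then pvBaseA.items            -- empty dict is falsy → return base
    else
      -- normalized = dict(base); for key, value in output_suitability.items(): …
      ((PySem.Dict.ofList xs).items.foldl
        (fun normalized kv =>
          if normalized.contains kv.1 && decide (kv.2 ∈ pvAllowedA)
          then normalized.insert kv.1 kv.2
          else normalized)
        pvBaseA).items

-- ===== PORT B =====
def pvAllowedB : List String := ["candidate", "strong", "weak", "not_suitable"]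

def pvBaseKeysB : List String := ["long_video", "shorts_reels", "carousel", "packaging"]

def normalize_output_suitability_alt (output_suitability : Option (List (String × String))) : List (String × String) :=
  -- src = output_suitability or {}
  let src := PySem.Dict.ofList (output_suitability.getD [])
  -- {k: (src[k] if src.get(k) in ALLOWED_OUTPUT_SUITABILITY else "candidate") for k in BASE_KEYS}
  pvBaseKeysB.map (fun k =>
    (k, match src.get? k with
        | some v => if v ∈ pvAllowedB then v else "candidate"
        | none => "candidate"))

-- ===== PRECONDITION & SPEC =====
def Spec_normalize_output_suitability (output_suitability : Option (List (String × String))) (out : List (String × String)) : Prop := out = normalize_output_suitability_alt output_suitability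
instance (output_suitability : Option (List (String × String))) (out : List (String × String)) : Decidable (Spec_normalize_output_suitability output_suitability out) := by unfold Spec_normalize_output_suitability; infer_instance

-- ===== CLAIM (what is proved, stated in full; the proofs are below) =====
def Claim_equal_normalize_output_suitability : Prop := ∀ (output_suitability : Option (List (String × String))), Dom_normalize_output_suitability output_suitability → Spec_normalize_output_suitability output_suitability (normalize_output_suitability output_suitability)

-- ===== LEMMAS AND PROOFS =====

-- the loop body of A
def pvStepA (n : PySem.Dict String String) (kv : String × String) : PySem.Dict String String :=
  if n.contains kv.1 && decide (kv.2 ∈ pvAllowedA) then n.insert kv.1 kv.2 else n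

lemma pvStepA_keys (l : List (String × String)) :
    ∀ n : PySem.Dict String String, (l.foldl pvStepA n).keys = n.keys := by
  induction l with
  | nil => intro n; rfl
  | cons kv t ih =>
    intro n
    simp only [List.foldl_cons, ih]
    unfold pvStepA
    by_cases hc : n.contains kv.1 = true
    · by_cases ha : kv.2 ∈ pvAllowedA
      · simp only [hc, ha, decide_true, Bool.and_self, if_true]
        exact PySem.Dict.keys_insert_of_contains _ _ hc
      · simp [ha]
    · simp [hc]

lemma pvStepA_getD (l : List (String × String)) :
    ∀ n : PySem.Dict String String, (l.map Prod.fst).Nodup → ∀ k : String,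
    (l.foldl pvStepA n).getD k "candidate" =
      match l.lookup k with
      | some v => if n.contains k && decide (v ∈ pvAllowedA) then v else n.getD k "candidate"
      | none => n.getD k "candidate" := by
  induction l with
  | nil => intro n _ k; rfl
  | cons kv t ih =>
    intro n hnd k
    obtain ⟨k0, v0⟩ := kv
    simp only [List.map_cons, List.nodup_cons] at hnd
    simp only [List.foldl_cons, ih _ hnd.2 k]
    by_cases hk : k = k0
    · subst hk
      have hlt : t.lookup k = none := by
        rw [List.lookup_eq_none_iff]
        intro p hp
        have : k ≠ p.1 := fun h => hnd.1 (h ▸ List.mem_map_of_mem hp)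
        simpa using this
      simp only [List.lookup_cons, hlt, beq_self_eq_true]
      unfold pvStepA
      by_cases hc : n.contains k = true
      · by_cases ha : v0 ∈ pvAllowedA
        · simp [hc, ha, PySem.Dict.getD_insert_self]
        · simp [hc, ha]
      · simp [hc]
    · have hbk : (k == k0) = false := by simp [hk]
      simp only [List.lookup_cons, hbk]
      have hcont : (pvStepA n (k0, v0)).contains k = n.contains k := by
        unfold pvStepA
        split
        · simp [PySem.Dict.contains_insert, hbk]
        · rfl
      have hgetD : (pvStepA n (k0, v0)).getD k "candidate" = n.getD k "candidate" := by
        unfold pvStepA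
        split
        · exact PySem.Dict.getD_insert_of_ne _ _ _ hk
        · rfl
      rw [hcont, hgetD]

lemma pv_lookup_eq_get? (l : List (String × String)) (k : String) :
    l.lookup k = (PySem.Dict.mk l).get? k := by
  induction l with
  | nil => rfl
  | cons kv t ih =>
    obtain ⟨k0, v0⟩ := kv
    rw [PySem.Dict.get?_mk_cons, List.lookup_cons]
    by_cases hk : k = k0
    · subst hk; simp
    · have hb : (k == k0) = false := by simp [hk]
      have hb2 : (k0 == k) = false := by simp [Ne.symm hk]
      simp [hb, hb2, ih]

lemma pv_items_mk (d : PySem.Dict String String) : PySem.Dict.mk d.items = d := rfl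

-- ===== VERDICT (by name: the statement is the Claim_ definition above) =====
theorem normalize_output_suitability_spec : Claim_equal_normalize_output_suitability := by
  intro o _
  unfold Spec_normalize_output_suitability
  match o with
  | none => decide
  | some xs =>
    by_cases hxs : xs.isEmpty
    · rw [List.isEmpty_iff] at hxs
      subst hxs
      decide
    · unfold normalize_output_suitability normalize_output_suitability_alt
      simp only [hxs, Option.getD_some]
      set d := PySem.Dict.ofList xs with hd
      have hnd : d.keys.Nodup := PySem.Dict.nodup_keys_ofList xs
      have hndl : (d.items.map Prod.fst).Nodup := hnd
      have hkeys : (d.items.foldl pvStepA pvBaseA).keys = pvBaseA.keys := pvStepA_keys _ _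
      have hnd' : (d.items.foldl pvStepA pvBaseA).keys.Nodup := by
        rw [hkeys]; decide
      have hitems := PySem.Dict.items_eq_map_keys (d.items.foldl pvStepA pvBaseA) hnd' "candidate"
      show (d.items.foldl pvStepA pvBaseA).items = _
      rw [hitems, hkeys]
      have hbk : pvBaseA.keys = pvBaseKeysB := by decide
      rw [hbk]
      apply List.map_congr_left
      intro k hk
      have hg := pvStepA_getD d.items pvBaseA hndl k
      have hlk : d.items.lookup k = d.get? k := by
        rw [pv_lookup_eq_get?, pv_items_mk]
      rw [hg, hlk]
      have hcont : pvBaseA.contains k = true := by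
        fin_cases hk <;> decide
      have hbd : pvBaseA.getD k "candidate" = "candidate" := by
        fin_cases hk <;> decide
      rw [hcont, hbd]
      cases d.get? k with
      | none => rfl
      | some v => simp [pvAllowedA, pvAllowedB]
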